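-- pv_equiv track=rewrite | github.com/Insyy/Project-euler-challenges | digitalRoot.py | compare2Digits
-- ===== SOURCE A (Python) =====
-- EnergyCost= {
--     0 : '1011111',
--     1 : '0000011',
--     2 : '1110110',
--     3 : '1110011',
--     4 : '0101011',
--     5 : '1111001',
--     6 : '1111101',
--     7 : '1001011',
--     8 : '1111111',
--     9 : '1011111'
-- }
--
-- def compare2Digits(a, b):
--     bitsA = EnergyCost[int(a)]
--     bitsB = EnergyCost[int(b)]
--     result = ""
--     for i in range(7):
--         if bitsA[i] == '1' and bitsB[i] == '1':
--             result += '1'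
--         else:
--             result += '0'
--     return result
-- ===== SOURCE B (Python) =====
-- EnergyCost = {
--     0 : '1011111',
--     1 : '0000011',
--     2 : '1110110',
--     3 : '1110011',
--     4 : '0101011',
--     5 : '1111001',
--     6 : '1111101',
--     7 : '1001011',
--     8 : '1111111',
--     9 : '1011111'
-- }
--
-- def compare2Digits(a, b):
--     x = int(EnergyCost[int(a)], 2) & int(EnergyCost[int(b)], 2)
--     return format(x, '07b')
-- ===== Notes on version B (the rewrite author's own statement) =====
-- stated objective: idiomatic
-- what changed: Replaces the positional 7-step string loop with a single integer bitwise AND: the two bit-pattern strings are parsed as base-2 integers, ANDed, and formatted back as a 7-character zero-padded binary string.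
import Mathlib
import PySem

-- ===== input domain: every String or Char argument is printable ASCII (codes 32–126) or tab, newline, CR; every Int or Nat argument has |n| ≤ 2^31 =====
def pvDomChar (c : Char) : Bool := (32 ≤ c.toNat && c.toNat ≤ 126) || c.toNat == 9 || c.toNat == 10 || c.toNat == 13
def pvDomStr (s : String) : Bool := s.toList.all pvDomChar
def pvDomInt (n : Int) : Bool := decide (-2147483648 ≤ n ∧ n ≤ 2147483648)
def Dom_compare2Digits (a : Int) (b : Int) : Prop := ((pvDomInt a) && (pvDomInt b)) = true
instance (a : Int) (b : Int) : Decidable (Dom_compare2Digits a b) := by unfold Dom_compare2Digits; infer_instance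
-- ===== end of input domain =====

-- B replaces A's positional 7-step string loop by one integer bitwise AND (parse base-2,
-- AND, format back as 7-char binary); objective: idiomatic, return values identical on 0..9.

-- ===== PORT A =====
-- the EnergyCost dict (insertion order)
def energyCost : PySem.Dict Int String :=
  PySem.Dict.ofList ([(0, "1011111"), (1, "0000011"), (2, "1110110"), (3, "1110011"), (4, "0101011"),
   (5, "1111001"), (6, "1111101"), (7, "1001011"), (8, "1111111"), (9, "1011111")] : List (Int × String))

-- A: look up both patterns, then loop i in range(7) appending '1' iff both chars are '1'.
-- Missing key / index would be a KeyError/IndexError in Python: those inputs are outside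
-- Pre_; the port returns "" for a missing key there (unclaimed).
def compare2Digits (a : Int) (b : Int) : String :=
  let bitsA := (PySem.Dict.get? energyCost a).getD ""
  let bitsB := (PySem.Dict.get? energyCost b).getD ""
  (PySem.List.pyRange 0 7 1).foldl (fun result i =>
    if PySem.Str.pyGet? bitsA i = some '1' ∧ PySem.Str.pyGet? bitsB i = some '1' then
      result ++ "1" else result ++ "0") ""

-- ===== PORT B =====
-- int(s, 2)
def parseBin (s : String) : Nat :=
  s.toList.foldl (fun acc c => 2 * acc + (if c = '1' then 1 else 0)) 0

-- format(x, '07b') for x < 2^7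
def format07b (x : Nat) : String :=
  String.ofList ((List.range 7).map (fun i => if x.testBit (6 - i) then '1' else '0'))

def compare2Digits_alt (a : Int) (b : Int) : String :=
  let x := Nat.land (parseBin ((PySem.Dict.get? energyCost a).getD ""))
                    (parseBin ((PySem.Dict.get? energyCost b).getD ""))
  format07b x

-- ===== PRECONDITION & SPEC =====
-- Python A raises KeyError unless both arguments are keys of EnergyCost, i.e. digits 0..9.
def Pre_compare2Digits (a : Int) (b : Int) : Prop :=
  (0 ≤ a ∧ a ≤ 9) ∧ (0 ≤ b ∧ b ≤ 9)
instance (a : Int) (b : Int) : Decidable (Pre_compare2Digits a b) := by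
  unfold Pre_compare2Digits; infer_instance

def pvWitness_compare2Digits : Int × Int := (3, 7)

def Spec_compare2Digits (a : Int) (b : Int) (out : String) : Prop := out = compare2Digits_alt a b
instance (a : Int) (b : Int) (out : String) : Decidable (Spec_compare2Digits a b out) := by
  unfold Spec_compare2Digits; infer_instance

-- ===== CLAIM (what is proved, stated in full; the proofs are below) =====
def Claim_equal_compare2Digits : Prop := ∀ (a : Int) (b : Int), Dom_compare2Digits a b → Pre_compare2Digits a b → Spec_compare2Digits a b (compare2Digits a b)

-- ===== LEMMAS AND PROOFS =====

-- ===== VERDICT (by name: the statement is the Claim_ definition above) =====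
theorem compare2Digits_spec : Claim_equal_compare2Digits := by
  intro a b _ hpre
  obtain ⟨⟨ha0, ha9⟩, ⟨hb0, hb9⟩⟩ := hpre
  unfold Spec_compare2Digits
  interval_cases a <;> interval_cases b <;> decide
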